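-- pv_equiv track=rewrite | github.com/Rakeshrallabandi/leetcode_problems | 3885-count-special-triplets/count-special-triplets.py | specialTriplets
-- ===== SOURCE A (Python) =====
-- from typing import List
--
-- def specialTriplets(nums: List[int]) -> int:
--     l={}
--     r={}
--     count=0
--     for i in nums:
--         r[i]=r.get(i,0)+1
--
--     for i in nums:
--         r[i]-=1
--         if r[i]==0:
--             del r[i]
--         if i*2 in l and i*2 in r:
--             count+=(l[i*2]*r[i*2])
--             count%=10**9 + 7
--         l[i]=l.get(i,0)+1
--
--     return count
-- ===== SOURCE B (Python) =====
-- from typing import List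
--
-- def specialTriplets(nums: List[int]) -> int:
--     MOD = 10 ** 9 + 7
--     pos = {}
--     for j, x in enumerate(nums):
--         pos.setdefault(x, []).append(j)
--     total = 0
--     for x, J in pos.items():
--         P = pos.get(2 * x, [])
--         if not P:
--             continue
--         m = len(P)
--         dup = 1 if x == 0 else 0
--         a = 0
--         for j in J:
--             while a < m and P[a] < j:
--                 a += 1
--             total += a * (m - a - dup)
--     return total % MOD
-- ===== Notes on version B (the rewrite author's own statement) =====
-- stated objective: alternative
-- what changed: Replaces A's single streaming pass with two evolving per-element count dicts (prefix l, decrement-and-delete suffix r) by a value-grouped algorithm: one dict of position lists built once, then for each value group a two-pointer merge into the sorted position list of the doubled value yields each middle element's left count, with the right count derived from the group size.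
import Mathlib
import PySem

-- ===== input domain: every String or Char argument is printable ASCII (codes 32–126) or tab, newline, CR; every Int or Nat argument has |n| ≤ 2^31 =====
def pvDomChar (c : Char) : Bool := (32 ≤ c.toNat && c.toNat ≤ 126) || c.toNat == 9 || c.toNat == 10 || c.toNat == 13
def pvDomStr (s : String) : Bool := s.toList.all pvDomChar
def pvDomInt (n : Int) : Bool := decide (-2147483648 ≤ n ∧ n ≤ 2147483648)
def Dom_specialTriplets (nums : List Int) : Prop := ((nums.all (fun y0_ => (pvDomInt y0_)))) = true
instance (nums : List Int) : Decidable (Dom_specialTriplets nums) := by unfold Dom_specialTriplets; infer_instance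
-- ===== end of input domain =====

-- B replaces A's two evolving per-element count dictionaries by a dictionary of position lists
-- built once, then counts per value group with a two-pointer merge into the sorted position
-- list of the doubled value (alternative algorithm of the same asymptotic cost).

-- ===== PORT A =====
-- the counting loop 'for i in nums: r[i] = r.get(i, 0) + 1'
def pvBuildCount (d : PySem.Dict Int Int) (x : Int) : PySem.Dict Int Int :=
  d.insert x (d.getD x 0 + 1)

def pvStepA (st : PySem.Dict Int Int × PySem.Dict Int Int × Int) (i : Int) :
    PySem.Dict Int Int × PySem.Dict Int Int × Int :=
  let l := st.1
  let r := st.2.1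
  let count := st.2.2
  let r := r.insert i (r.getD i 0 - 1)          -- r[i] -= 1 (the key is always present here)
  let r := if r.getD i 0 == 0 then r.erase i else r
  let count :=
    if l.contains (i*2) && r.contains (i*2) then
      PySem.Int.mod (count + l.getD (i*2) 0 * r.getD (i*2) 0) (10^9 + 7)
    else count
  (l.insert i (l.getD i 0 + 1), r, count)

def specialTriplets (nums : List Int) : Int :=
  let r := nums.foldl pvBuildCount PySem.Dict.empty
  (nums.foldl pvStepA (PySem.Dict.empty, r, 0)).2.2

-- ===== PORT B =====
-- the pointer advance 'while a < m and P[a] < j: a += 1'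
def pvAdv (P : List Int) (j : Int) (a : Nat) : Nat :=
  if h : a < P.length then
    if P[a] < j then pvAdv P j (a + 1) else a
  else a
termination_by P.length - a

-- one iteration of B's outer loop over pos.items(): skip if P empty, else the inner two-pointer loop
def pvGroupStep (pos : PySem.Dict Int (List Int)) (tot : Int) (it : Int × List Int) : Int :=
  let P := pos.getD (2 * it.1) []
  if P.isEmpty then tot
  else
    let dup : Int := if it.1 == 0 then 1 else 0
    (it.2.foldl (fun st j =>
        let a' := pvAdv P j st.1
        (a', st.2 + (a' : Int) * ((P.length : Int) - (a' : Int) - dup))) (0, tot)).2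

def specialTriplets_alt (nums : List Int) : Int :=
  let pos := (PySem.List.enumerate nums).foldl
      (fun d q => d.modify q.2 [] (fun L => L ++ [q.1])) PySem.Dict.empty
  PySem.Int.mod (pos.items.foldl (pvGroupStep pos) 0) (10 ^ 9 + 7)

-- ===== PRECONDITION & SPEC =====
def Spec_specialTriplets (nums : List Int) (out : Int) : Prop := out = specialTriplets_alt nums
instance (nums : List Int) (out : Int) : Decidable (Spec_specialTriplets nums out) := by unfold Spec_specialTriplets; infer_instance

-- ===== CLAIM (what is proved, stated in full; the proofs are below) =====
def Claim_equal_specialTriplets : Prop := ∀ (nums : List Int), Dom_specialTriplets nums → Spec_specialTriplets nums (specialTriplets nums)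

-- ===== LEMMAS AND PROOFS =====

-- the common reference value: sum of prefix-count * suffix-count products, prefix p already processed
def sumTerms : List Int → List Int → Int
  | _, [] => 0
  | p, x :: s => (p.count (2*x) : Int) * (s.count (2*x) : Int) + sumTerms (p ++ [x]) s

-- erase is items-filter; these two lookup lemmas about it are proved here once
theorem pvGet?_erase_self {ν : Type} (d : PySem.Dict Int ν) (k : Int) : (d.erase k).get? k = none := by
  cases d with | mk items =>
  simp only [PySem.Dict.erase, PySem.Dict.get?, Option.map_eq_none_iff, List.find?_eq_none]
  intro x hx
  simp [List.mem_filter] at hx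
  simpa using hx.2

theorem pvGet?_erase_of_ne {ν : Type} (d : PySem.Dict Int ν) (k k' : Int) (h : k' ≠ k) :
    (d.erase k).get? k' = d.get? k' := by
  cases d with | mk items =>
  induction items with
  | nil => rfl
  | cons p rest ih =>
    by_cases hpk : p.1 = k
    · simp only [PySem.Dict.erase, PySem.Dict.get?, List.filter_cons] at *
      simp [hpk, Ne.symm h] at *
      exact ih
    · simp only [PySem.Dict.erase, PySem.Dict.get?, List.filter_cons] at *
      by_cases hpk' : p.1 = k'
      · simp [hpk', h]
      · simp [hpk, hpk'] at *
        exact ih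

-- the dict built by the counting loop: a lookup is the list count, absent iff count zero
theorem pvBuild_get? (p : List Int) (k : Int) :
    (p.foldl pvBuildCount PySem.Dict.empty).get? k =
      if 0 < p.count k then some ((p.count k : Int)) else none := by
  induction p using List.reverseRecOn generalizing k with
  | nil => simp [PySem.Dict.get?_empty]
  | append_singleton p x ih =>
    rw [List.foldl_append]
    simp only [List.foldl_cons, List.foldl_nil]
    have hstep : ∀ (d : PySem.Dict Int Int) (x' : Int), pvBuildCount d x' = d.insert x' (d.getD x' 0 + 1) := fun _ _ => rfl
    rw [hstep, PySem.Dict.get?_insert, PySem.Dict.getD_eq_get?_getD, ih x]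
    by_cases hxk : k = x
    · subst hxk
      have hx : List.count k (p ++ [k]) = List.count k p + 1 := by simp
      rw [hx]
      split_ifs <;> simp_all [List.count_eq_zero]
    · simp [hxk, ih k, List.count_append, Ne.symm hxk]

theorem pvBuild_getD (p : List Int) (k : Int) :
    (p.foldl pvBuildCount PySem.Dict.empty).getD k 0 = (p.count k : Int) := by
  rw [PySem.Dict.getD_eq_get?_getD, pvBuild_get?]
  split_ifs with h
  · simp
  · simp
    omega

theorem pvBuild_contains (p : List Int) (k : Int) :
    (p.foldl pvBuildCount PySem.Dict.empty).contains k = decide (0 < p.count k) := by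
  rw [PySem.Dict.contains_eq_isSome_get?, pvBuild_get?]
  split_ifs with h <;> simp [h]

-- A's loop over the suffix s, started with the prefix-count dict for p, a suffix-count dict for s,
-- and a running count ≡ acc (mod M), ends at (acc + sumTerms p s) mod M
theorem pvAinv (s : List Int) : ∀ (p : List Int) (r : PySem.Dict Int Int) (c acc : Int),
    (∀ k, r.get? k = if 0 < s.count k then some ((s.count k : Int)) else none) →
    c = PySem.Int.mod acc (10^9+7) →
    (s.foldl pvStepA (p.foldl pvBuildCount PySem.Dict.empty, r, c)).2.2
      = PySem.Int.mod (acc + sumTerms p s) (10^9+7) := by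
  induction s with
  | nil =>
    intro p r c acc _ hc
    simpa [sumTerms] using hc
  | cons i t ih =>
    intro p r c acc hr hc
    simp only [List.foldl_cons]
    -- the decremented count of i
    have hri : r.getD i 0 = ((t.count i : Int) + 1) := by
      rw [PySem.Dict.getD_eq_get?_getD, hr i]
      simp [List.count_cons_self]
    -- r after the decrement
    set r1 := r.insert i (r.getD i 0 - 1) with hr1def
    have hr1 : ∀ k, r1.get? k = if k = i then some ((t.count i : Int)) else r.get? k := by
      intro k
      rw [hr1def, PySem.Dict.get?_insert, hri]
      split_ifs <;> norm_num
    have hr1i : r1.getD i 0 = (t.count i : Int) := by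
      rw [PySem.Dict.getD_eq_get?_getD, hr1 i]; simp
    -- r after the conditional delete, characterised
    set r2 := if r1.getD i 0 == 0 then r1.erase i else r1 with hr2def
    have hr2 : ∀ k, r2.get? k = if 0 < t.count k then some ((t.count k : Int)) else none := by
      intro k
      by_cases hki : k = i
      · subst hki
        by_cases hz : List.count k t = 0
        · have hz' : (r1.getD k 0 == 0) = true := by rw [hr1i]; simp [hz]
          rw [hr2def, if_pos hz', pvGet?_erase_self]
          simp [hz]
        · have hz' : ¬ ((r1.getD k 0 == 0) = true) := by rw [hr1i]; simp; omega
          rw [hr2def, if_neg hz', hr1 k]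
          simp [Nat.pos_of_ne_zero hz]
      · have hcnt : List.count k (i :: t) = List.count k t := List.count_cons_of_ne (Ne.symm hki)
        have hk' : r1.get? k = if 0 < List.count k t then some ((List.count k t : Int)) else none := by
          rw [hr1 k, if_neg hki, hr k, hcnt]
        by_cases hz : (r1.getD i 0 == 0) = true
        · rw [hr2def, if_pos hz, pvGet?_erase_of_ne _ _ _ hki]; exact hk'
        · rw [hr2def, if_neg hz]; exact hk'
    have hr2c : r2.contains (i*2) = decide (0 < t.count (i*2)) := by
      rw [PySem.Dict.contains_eq_isSome_get?, hr2]
      split_ifs with h <;> simp [h]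
    have hr2g : r2.getD (i*2) 0 = if 0 < t.count (i*2) then ((t.count (i*2) : Int)) else 0 := by
      rw [PySem.Dict.getD_eq_get?_getD, hr2]
      split_ifs <;> simp
    -- the new count is (acc + this step's term) mod M
    have hkey : (if (p.foldl pvBuildCount PySem.Dict.empty).contains (i*2) && r2.contains (i*2) then
          PySem.Int.mod (c + (p.foldl pvBuildCount PySem.Dict.empty).getD (i*2) 0 * r2.getD (i*2) 0) (10^9+7)
        else c)
        = PySem.Int.mod (acc + (p.count (2*i) : Int) * (t.count (2*i) : Int)) (10^9+7) := by
      rw [pvBuild_contains, hr2c, hr2g, pvBuild_getD]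
      have h2i : i * 2 = 2 * i := by ring
      rw [h2i]
      rw [PySem.Int.mod_eq_emod_of_pos (by norm_num)] at hc
      by_cases hp : 0 < p.count (2*i) <;> by_cases ht : 0 < t.count (2*i)
      · simp only [hp, ht, decide_true, Bool.and_self, if_pos,
          PySem.Int.mod_eq_emod_of_pos (show (0:Int) < 10^9+7 by norm_num), hc]
        generalize ((p.count (2*i) : Int) * (t.count (2*i) : Int)) = u
        omega
      · have h0 : (t.count (2*i) : Int) = 0 := by omega
        simp [hp, ht, h0, hc]
      · have h0 : (p.count (2*i) : Int) = 0 := by omega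
        simp [hp, ht, h0, hc]
      · have h0 : (p.count (2*i) : Int) = 0 := by omega
        simp [hp, ht, h0, hc]
    -- unfold one step of A's loop
    show (t.foldl pvStepA (pvStepA (p.foldl pvBuildCount PySem.Dict.empty, r, c) i)).2.2
      = PySem.Int.mod (acc + sumTerms p (i :: t)) (10^9+7)
    rw [pvStepA]
    simp only [← hr1def, ← hr2def]
    rw [hkey]
    have hfold : (p.foldl pvBuildCount PySem.Dict.empty).insert i
        ((p.foldl pvBuildCount PySem.Dict.empty).getD i 0 + 1)
        = (p ++ [i]).foldl pvBuildCount PySem.Dict.empty := by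
      rw [List.foldl_append]; rfl
    rw [hfold]
    rw [ih (p ++ [i]) r2 _ (acc + (p.count (2*i) : Int) * (t.count (2*i) : Int)) hr2 rfl]
    show PySem.Int.mod (acc + (p.count (2*i) : Int) * (t.count (2*i) : Int) + sumTerms (p ++ [i]) t) (10^9+7)
      = PySem.Int.mod (acc + ((p.count (2*i) : Int) * (t.count (2*i) : Int) + sumTerms (p ++ [i]) t)) (10^9+7)
    ring_nf

-- B-side abbreviations used only by the proofs: positions of v, and the per-index term
def pvIdx (nums : List Int) (v : Int) : List Int :=
  ((PySem.List.enumerate nums).filter (fun q => q.2 == v)).map (fun q => q.1)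

def pvG (nums : List Int) (q : Int × Int) : Int :=
  ((nums.take q.1.toNat).count (2 * q.2) : Int) * ((nums.drop (q.1.toNat + 1)).count (2 * q.2) : Int)

-- the enumerated per-index terms over the suffix s of p ++ s sum to sumTerms p s
theorem pvBridge (s : List Int) : ∀ (p : List Int),
    ((PySem.List.enumerate s (p.length : Int)).map (pvG (p ++ s))).sum = sumTerms p s := by
  induction s with
  | nil => intro p; simp [sumTerms]
  | cons x t ih =>
    intro p
    rw [PySem.List.enumerate_cons]
    simp only [List.map_cons, List.sum_cons]
    have h1 : pvG (p ++ x :: t) ((p.length : Int), x)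
        = (p.count (2*x) : Int) * (t.count (2*x) : Int) := by
      unfold pvG
      have ht : ((p.length : Int)).toNat = p.length := by simp
      rw [ht]
      have htake : (p ++ x :: t).take p.length = p := by
        simp
      have hdrop : (p ++ x :: t).drop (p.length + 1) = t := by
        have hx : p ++ x :: t = (p ++ [x]) ++ t := by simp
        rw [hx]
        have : p.length + 1 = (p ++ [x]).length := by simp
        rw [this]
        exact List.drop_left
      rw [htake, hdrop]
    have h2 : ((p.length : Int) + 1) = (((p ++ [x]).length : Nat) : Int) := by simp
    have h3 : p ++ x :: t = (p ++ [x]) ++ t := by simp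
    rw [h1, h2, h3, ih (p ++ [x])]
    show (p.count (2*x) : Int) * (t.count (2*x) : Int) + sumTerms (p ++ [x]) t = sumTerms p (x :: t)
    simp [sumTerms]

-- on a strictly increasing list, P[i] < j iff i is below the number of elements < j
theorem pvSorted_lt_iff : ∀ (P : List Int), P.Pairwise (· < ·) → ∀ (j : Int) (i : Nat) (hi : i < P.length),
    (P[i] < j ↔ i < P.countP (fun p => decide (p < j))) := by
  intro P
  induction P with
  | nil => intro _ j i hi; simp at hi
  | cons x t ih =>
    intro hP j i hi
    have hxt := List.pairwise_cons.mp hP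
    rw [List.countP_cons]
    cases i with
    | zero =>
      simp only [List.getElem_cons_zero]
      by_cases hx : x < j
      · simp [hx]
      · have ht0 : t.countP (fun p => decide (p < j)) = 0 := by
          rw [List.countP_eq_zero]
          intro p hp
          have := hxt.1 p hp
          simp only [decide_eq_true_eq]
          omega
        simp [hx, ht0]
    | succ i' =>
      simp only [List.getElem_cons_succ]
      by_cases hx : x < j
      · rw [ih hxt.2 j i' (by simpa using hi)]
        simp [hx]
      · have hi' : i' < t.length := by simpa using hi
        have ht0 : t.countP (fun p => decide (p < j)) = 0 := by
          rw [List.countP_eq_zero]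
          intro p hp
          have := hxt.1 p hp
          simp only [decide_eq_true_eq]
          omega
        have hti : ¬ t[i'] < j := by
          have := hxt.1 (t[i']'hi') (List.getElem_mem hi')
          omega
        simp [hx, ht0, hti]

-- the two-pointer advance lands exactly on the number of elements < j (sorted P, pointer not past it)
theorem pvAdv_eq (P : List Int) (hP : P.Pairwise (· < ·)) (j : Int) :
    ∀ (a : Nat), a ≤ P.countP (fun p => decide (p < j)) →
    pvAdv P j a = P.countP (fun p => decide (p < j)) := by
  intro a
  fun_induction pvAdv P j a with
  | case1 a h hlt ih =>
    intro _
    have halt : a < P.countP (fun p => decide (p < j)) :=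
      (pvSorted_lt_iff P hP j a h).mp hlt
    exact ih halt
  | case2 a h hlt =>
    intro ha
    have : ¬ a < P.countP (fun p => decide (p < j)) := by
      intro hc
      exact hlt ((pvSorted_lt_iff P hP j a h).mpr hc)
    omega
  | case3 a h =>
    intro ha
    have := List.countP_le_length (l := P) (p := fun p => decide (p < j))
    omega

-- B's inner two-pointer loop sums the per-middle products (J ascending, pointer below every bound)
theorem pvInnerFold (P : List Int) (hP : P.Pairwise (· < ·)) (dup : Int) :
    ∀ (J : List Int), J.Pairwise (· ≤ ·) →
    ∀ (a : Nat) (tot : Int), (∀ j ∈ J, a ≤ P.countP (fun p => decide (p < j))) →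
    (J.foldl (fun st j =>
        let a' := pvAdv P j st.1
        (a', st.2 + (a' : Int) * ((P.length : Int) - (a' : Int) - dup))) (a, tot)).2
    = tot + (J.map (fun j => ((P.countP (fun p => decide (p < j)) : Int)) *
        ((P.length : Int) - (P.countP (fun p => decide (p < j)) : Int) - dup))).sum := by
  intro J
  induction J with
  | nil => intro _ a tot _; simp
  | cons j t ih =>
    intro hJ a tot hbound
    have hjt := List.pairwise_cons.mp hJ
    simp only [List.foldl_cons, List.map_cons, List.sum_cons]
    have hadv : pvAdv P j a = P.countP (fun p => decide (p < j)) :=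
      pvAdv_eq P hP j a (hbound j (List.mem_cons_self))
    have hnext : ∀ j' ∈ t, P.countP (fun p => decide (p < j)) ≤ P.countP (fun p => decide (p < j')) := by
      intro j' hj'
      exact List.countP_mono_left (fun p _ hp => by
        have := hjt.1 j' hj'
        simp at hp ⊢
        omega)
    rw [ih hjt.2 _ _ (fun j' hj' => by rw [hadv]; exact hnext j' hj')]
    rw [hadv]
    ring

-- every index in enumerate xs s is at least s
theorem pvEnumGe {α : Type} (xs : List α) (s : Int) : ∀ q ∈ PySem.List.enumerate xs s, s ≤ q.1 := by
  intro q hq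
  obtain ⟨k, hk, rfl⟩ := (PySem.List.mem_enumerate_iff xs s q).mp hq
  simp

-- the number of positions of v below s+j is the count of v in the first j elements
theorem pvIdxCount (xs : List Int) : ∀ (s : Nat) (v : Int) (j : Nat),
    ((((PySem.List.enumerate xs (s : Int)).filter (fun q => q.2 == v)).map (fun q => q.1)).countP
      (fun p => decide (p < ((s + j : Nat) : Int)))) = (xs.take j).count v := by
  induction xs with
  | nil => intro s v j; simp
  | cons x t ih =>
    intro s v j
    rw [PySem.List.enumerate_cons]
    cases j with
    | zero =>
      simp only [Nat.add_zero, List.take_zero, List.count_nil]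
      rw [List.countP_eq_zero]
      intro p hp
      simp only [List.mem_map, List.mem_filter] at hp
      obtain ⟨q, ⟨hq, _⟩, rfl⟩ := hp
      rcases List.mem_cons.mp hq with h | h
      · subst h; simp
      · have := pvEnumGe t ((s:Int)+1) q h
        simp only [decide_eq_true_eq]
        omega
    | succ j' =>
      rw [List.filter_cons]
      have hsj : (s + (j' + 1)) = ((s+1) + j') := by omega
      have hcast : ((s:Int)) + 1 = (((s+1 : Nat)) : Int) := by push_cast; ring
      by_cases hxv : x = v
      · have hcnd : ((((s:Int), x)).2 == v) = true := by simp [hxv]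
        rw [hcnd]
        simp only [if_true, List.map_cons, List.countP_cons]
        rw [hsj, hcast, ih (s+1) v j']
        simp [hxv]
        omega
      · have hcnd : ((((s:Int), x)).2 == v) = false := by simp [hxv]
        rw [hcnd]
        simp only [Bool.false_eq_true, if_false]
        rw [hsj, hcast, ih (s+1) v j']
        simp [hxv]

-- the number of positions of v is the count of v
theorem pvIdxLen (xs : List Int) : ∀ (s v : Int),
    ((PySem.List.enumerate xs s).filter (fun q => q.2 == v)).length = xs.count v := by
  induction xs with
  | nil => intro s v; simp
  | cons x t ih =>
    intro s v
    rw [PySem.List.enumerate_cons, List.filter_cons]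
    by_cases hxv : x = v
    · simp [hxv, ih (s+1) v, List.count_cons_self]
    · have hbeq : (x == v) = false := by simp [hxv]
      simp [hbeq, ih (s+1) v, hxv]

-- position lists are strictly increasing
theorem pvIdxSorted (nums : List Int) (v : Int) : (pvIdx nums v).Pairwise (· < ·) :=
  ((PySem.List.pairwise_lt_enumerate nums 0).filter _).map _ (fun _ _ h => h)

-- summing an indicator over a duplicate-free covering list yields the single value
theorem pvSumIndicator : ∀ (V : List Int) (x : Int) (c : Int), V.Nodup → x ∈ V →
    (V.map (fun v => if v = x then c else 0)).sum = c := by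
  intro V
  induction V with
  | nil => intro x c _ hx; simp at hx
  | cons w t ih =>
    intro x c hnd hx
    simp only [List.map_cons, List.sum_cons]
    by_cases hwx : w = x
    · have hxt : x ∉ t := by rw [← hwx]; exact (List.nodup_cons.mp hnd).1
      have hz : ∀ y ∈ (t.map (fun v => if v = x then c else 0)), y = 0 := by
        intro y hy
        obtain ⟨v, hv, rfl⟩ := List.mem_map.mp hy
        have hne : v ≠ x := fun he => hxt (he ▸ hv)
        simp [hne]
      rw [if_pos hwx, List.sum_eq_zero hz]
      simp
    · have hxt : x ∈ t := by
        rcases List.mem_cons.mp hx with h | h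
        · exact absurd h.symm hwx
        · exact h
      rw [if_neg hwx, ih x c (List.nodup_cons.mp hnd).2 hxt]
      simp

-- partitioning a sum over enumerate by the value component
theorem pvFiber (f : Int × Int → Int) : ∀ (e : List (Int × Int)) (V : List Int), V.Nodup →
    (∀ q ∈ e, q.2 ∈ V) →
    (V.map (fun v => ((e.filter (fun q => q.2 == v)).map f).sum)).sum = (e.map f).sum := by
  intro e
  induction e with
  | nil => intro V _ _; simp
  | cons q t ih =>
    intro V hnd hcov
    simp only [List.map_cons, List.sum_cons]
    have hsplit : ∀ v, (((q :: t).filter (fun r => r.2 == v)).map f).sum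
        = (if v = q.2 then f q else 0) + ((t.filter (fun r => r.2 == v)).map f).sum := by
      intro v
      rw [List.filter_cons]
      by_cases hv : q.2 = v
      · simp [hv]
      · have : (q.2 == v) = false := by simp [hv]
        simp [this, Ne.symm hv]
    have : (V.map (fun v => (((q :: t).filter (fun r => r.2 == v)).map f).sum))
        = (V.map (fun v => (if v = q.2 then f q else 0) + ((t.filter (fun r => r.2 == v)).map f).sum)) :=
      List.map_congr_left (fun v _ => hsplit v)
    rw [this, PySem.List.sum_map_add_int,
      pvSumIndicator V q.2 (f q) hnd (hcov q List.mem_cons_self),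
      ih V hnd (fun r hr => hcov r (List.mem_cons_of_mem q hr))]

-- counts of v in a prefix never exceed the total count
theorem pvCountTakeLe (nums : List Int) (k : Nat) (v : Int) :
    (nums.take k).count v ≤ nums.count v :=
  (List.take_sublist k nums).count_le v

-- one outer-loop step for the group of v equals adding the fiber's per-index terms
theorem pvGroup (nums : List Int) (pos : PySem.Dict Int (List Int))
    (hpos : ∀ w, pos.getD w [] = pvIdx nums w) (v : Int) (tot : Int) :
    pvGroupStep pos tot (v, pvIdx nums v)
      = tot + (((PySem.List.enumerate nums).filter (fun q => q.2 == v)).map (pvG nums)).sum := by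
  unfold pvGroupStep
  simp only [hpos]
  have hmlen : (pvIdx nums (2*v)).length = nums.count (2*v) := by
    unfold pvIdx
    rw [List.length_map, pvIdxLen]
  by_cases hE : (pvIdx nums (2*v)).isEmpty
  · rw [if_pos hE]
    have hcnt0 : nums.count (2*v) = 0 := by
      rw [← hmlen]
      simpa [List.isEmpty_iff, List.length_eq_zero_iff] using hE
    have hz : ∀ q ∈ (PySem.List.enumerate nums).filter (fun q => q.2 == v), pvG nums q = 0 := by
      intro q hq
      have hqv : q.2 = v := by
        have := (List.mem_filter.mp hq).2
        simpa using this
      unfold pvG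
      have h1 : (nums.take q.1.toNat).count (2 * q.2) = 0 := by
        rw [hqv]
        have := pvCountTakeLe nums q.1.toNat (2*v)
        omega
      rw [h1]
      simp
    rw [List.sum_eq_zero (by
      intro y hy
      obtain ⟨q, hq, rfl⟩ := List.mem_map.mp hy
      exact hz q hq)]
    simp
  · rw [if_neg hE]
    have hPs : (pvIdx nums (2*v)).Pairwise (· < ·) := pvIdxSorted nums (2*v)
    have hJs : (pvIdx nums v).Pairwise (· ≤ ·) :=
      (pvIdxSorted nums v).imp (fun h => le_of_lt h)
    rw [pvInnerFold (pvIdx nums (2*v)) hPs _ (pvIdx nums v) hJs 0 tot (fun _ _ => Nat.zero_le _)]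
    congr 1
    rw [show pvIdx nums v = ((PySem.List.enumerate nums).filter (fun q => q.2 == v)).map (fun q => q.1) from rfl,
      List.map_map]
    refine congrArg List.sum (List.map_congr_left ?_)
    intro q hq
    have hqe : q ∈ PySem.List.enumerate nums 0 := (List.mem_filter.mp hq).1
    have hqv : q.2 = v := by
      have := (List.mem_filter.mp hq).2
      simpa using this
    obtain ⟨k, hk, hqk⟩ := (PySem.List.mem_enumerate_iff nums 0 q).mp hqe
    have hq1 : q.1 = (k : Int) := by rw [hqk]; simp
    have hnumsk : nums[k] = v := by rw [← hqv, hqk]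
    have hcP : (pvIdx nums (2*v)).countP (fun p => decide (p < (k : Int)))
        = (nums.take k).count (2*v) := by
      unfold pvIdx
      have h := pvIdxCount nums 0 (2*v) k
      simpa using h
    have hsplitc : nums.count (2*v) = (nums.take k).count (2*v)
        + (if nums[k] = 2*v then 1 else 0) + (nums.drop (k+1)).count (2*v) := by
      conv_lhs => rw [← List.take_append_drop k nums]
      rw [List.drop_eq_getElem_cons hk, List.count_append, List.count_cons]
      by_cases h2 : nums[k] = 2*v
      · simp [h2]
        omega
      · have hb : (nums[k] == 2*v) = false := by simp [h2]
        simp [hb, h2]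
    show ((pvIdx nums (2*v)).countP (fun p => decide (p < q.1)) : Int) *
        (((pvIdx nums (2*v)).length : Int) - ((pvIdx nums (2*v)).countP (fun p => decide (p < q.1)) : Int)
          - (if v == 0 then (1:Int) else 0))
      = pvG nums q
    rw [hq1, hcP, hmlen]
    unfold pvG
    rw [hqv, hq1]
    simp only [Int.toNat_natCast]
    by_cases hv0 : v = 0
    · have hd : nums[k] = 2*v := by rw [hnumsk, hv0]; ring
      have hb : (v == (0:Int)) = true := by simp [hv0]
      rw [hb, if_pos rfl]
      rw [hd, if_pos rfl] at hsplitc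
      have hm : (nums.count (2*v) : Int) = ((nums.take k).count (2*v) : Int) + 1
          + ((nums.drop (k+1)).count (2*v) : Int) := by exact_mod_cast hsplitc
      rw [hm]
      ring
    · have hd : ¬ nums[k] = 2*v := by rw [hnumsk]; omega
      have hb : (v == (0:Int)) = false := by simp [hv0]
      rw [hb]
      rw [if_neg hd] at hsplitc
      have hm : (nums.count (2*v) : Int) = ((nums.take k).count (2*v) : Int)
          + ((nums.drop (k+1)).count (2*v) : Int) := by exact_mod_cast hsplitc
      simp only [Bool.false_eq_true, if_false]
      rw [hm]
      ring

-- ===== VERDICT (by name: the statement is the Claim_ definition above) =====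
theorem specialTriplets_spec : Claim_equal_specialTriplets := by
  intro nums _
  show specialTriplets nums = specialTriplets_alt nums
  show (nums.foldl pvStepA (PySem.Dict.empty, nums.foldl pvBuildCount PySem.Dict.empty, 0)).2.2
      = PySem.Int.mod ((((PySem.List.enumerate nums).foldl
          (fun d q => d.modify q.2 [] (fun L => L ++ [q.1])) PySem.Dict.empty).items).foldl
          (pvGroupStep ((PySem.List.enumerate nums).foldl
            (fun d q => d.modify q.2 [] (fun L => L ++ [q.1])) PySem.Dict.empty)) 0) (10 ^ 9 + 7)
  -- A's side: the loop value is sumTerms mod M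
  have hA : (nums.foldl pvStepA (PySem.Dict.empty, nums.foldl pvBuildCount PySem.Dict.empty, 0)).2.2
      = PySem.Int.mod (0 + sumTerms [] nums) (10^9+7) := by
    have h0 : ([] : List Int).foldl pvBuildCount PySem.Dict.empty = PySem.Dict.empty := rfl
    rw [← h0]
    refine pvAinv nums [] _ 0 0 (fun k => pvBuild_get? nums k) ?_
    simp
  -- B's side: the dict of position lists
  set pos : PySem.Dict Int (List Int) := (PySem.List.enumerate nums).foldl
      (fun d q => d.modify q.2 [] (fun L => L ++ [q.1])) PySem.Dict.empty with hposdef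
  have hgetD : ∀ w, pos.getD w [] = pvIdx nums w := by
    intro w
    rw [hposdef]
    have hmapped : (PySem.List.enumerate nums).foldl
        (fun d q => d.modify q.2 [] (fun L => L ++ [q.1])) PySem.Dict.empty
      = ((PySem.List.enumerate nums).map (fun q => (q.2, q.1))).foldl
        (fun d p => d.modify p.1 [] (fun L => L ++ [p.2])) PySem.Dict.empty := by
      rw [List.foldl_map]
    rw [hmapped, PySem.Dict.getD_foldl_modify_append]
    unfold pvIdx
    simp [List.filter_map, List.map_map, Function.comp_def]
  have hkeynd : pos.keys.Nodup := by
    rw [hposdef]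
    exact PySem.Dict.nodup_keys_foldl_modify_key (PySem.List.enumerate nums) (fun q => q.2) []
      (fun _ q => fun L => L ++ [q.1]) PySem.Dict.empty List.nodup_nil
  have hkeys : pos.keys = PySem.Set.ofList nums := by
    rw [hposdef]
    rw [PySem.Dict.keys_foldl_modify_key (PySem.List.enumerate nums) (fun q => q.2) []
      (fun _ q => fun L => L ++ [q.1]) PySem.Dict.empty]
    rw [PySem.List.map_snd_enumerate]
    rfl
  have hitems : pos.items = (PySem.Set.ofList nums).map (fun w => (w, pvIdx nums w)) := by
    rw [PySem.Dict.items_eq_map_keys pos hkeynd [], hkeys]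
    exact List.map_congr_left (fun w _ => by rw [hgetD w])
  -- the outer fold over items
  rw [hitems, List.foldl_map]
  have hstep : ∀ (tot : Int) (w : Int), pvGroupStep pos tot (w, pvIdx nums w)
      = tot + (((PySem.List.enumerate nums).filter (fun q => q.2 == w)).map (pvG nums)).sum :=
    fun tot w => pvGroup nums pos hgetD w tot
  simp only [hstep]
  rw [PySem.List.foldl_add (PySem.Set.ofList nums)
    (fun w => (((PySem.List.enumerate nums).filter (fun q => q.2 == w)).map (pvG nums)).sum) 0]
  have hcov : ∀ q ∈ PySem.List.enumerate nums, q.2 ∈ PySem.Set.ofList nums := by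
    intro q hq
    obtain ⟨k, hk, rfl⟩ := (PySem.List.mem_enumerate_iff nums 0 q).mp hq
    simp [PySem.Set.mem_ofList]
  rw [pvFiber (pvG nums) (PySem.List.enumerate nums) (PySem.Set.ofList nums)
    (PySem.Set.nodup_ofList nums) hcov]
  have hBr := pvBridge nums []
  simp only [List.nil_append, List.length_nil, Nat.cast_zero] at hBr
  rw [hA, hBr]
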